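-- pv_equiv track=rewrite | github.com/merlleu/ldv-dashbot | ldv_watcher/hook.py | preprocess_message_for_telegram
-- ===== SOURCE A (Python) =====
-- def preprocess_message_for_telegram(c):
--     rp = {
--         '**': '*',
--         '>': '\\>',
--         '_': '\\_',
--         '-': '\\-',
--         '<': '\\<',
--         '#': '\\#',
--         '+': '\\+',
--         '=': '\\=',
--         '/': '\\/',
--         '.': '\\.',
--     }
--     for i in range(len(c)):
--         s = c[i]
--         for k,v in rp.items():
--             s = s.replace(k, v)
--         c[i] = s
--     return c
-- ===== SOURCE B (Python) =====
-- _ESC = frozenset('>_-<#+=/.')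
--
-- def preprocess_message_for_telegram(c):
--     # one fused left-to-right scan per string: collapse '**'->'*' and escape
--     # the nine special characters in a single pass with an output accumulator
--     for i in range(len(c)):
--         s = c[i]
--         out = []
--         j, n = 0, len(s)
--         while j < n:
--             ch = s[j]
--             if ch == '*' and j + 1 < n and s[j + 1] == '*':
--                 out.append('*')
--                 j += 2
--             else:
--                 if ch in _ESC:
--                     out.append('\\')
--                 out.append(ch)
--                 j += 1
--         c[i] = ''.join(out)
--     return c
-- ===== Notes on version B (the rewrite author's own statement) =====
-- stated objective: alternative
-- what changed: A runs ten sequential full-string str.replace passes; B processes each string in one fused left-to-right character scan with an explicit index and output accumulator, handling the '**'->'*' collapse and all nine escapes together in a single pass.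
import Mathlib
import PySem

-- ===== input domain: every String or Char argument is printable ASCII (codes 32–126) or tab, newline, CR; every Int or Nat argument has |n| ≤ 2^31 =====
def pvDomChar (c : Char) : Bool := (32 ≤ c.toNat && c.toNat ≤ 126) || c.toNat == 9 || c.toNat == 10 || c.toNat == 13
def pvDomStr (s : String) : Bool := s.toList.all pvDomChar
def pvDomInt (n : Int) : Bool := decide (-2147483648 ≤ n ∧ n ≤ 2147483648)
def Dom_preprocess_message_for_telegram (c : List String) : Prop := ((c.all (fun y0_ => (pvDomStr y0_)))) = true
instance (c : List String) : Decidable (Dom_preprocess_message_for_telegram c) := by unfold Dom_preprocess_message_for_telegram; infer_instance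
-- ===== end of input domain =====

-- B replaces A's ten sequential full-string replace passes by ONE fused left-to-right scan per
-- string ('**' collapse and escaping handled together with an output accumulator); equivalence is
-- about the return value (both Pythons also mutate the argument list in place, identically).

-- ===== PORT A =====
-- the dict rp, in insertion order
def rpA : List (String × String) :=
  [("**", "*"), (">", "\\>"), ("_", "\\_"), ("-", "\\-"), ("<", "\\<"),
   ("#", "\\#"), ("+", "\\+"), ("=", "\\="), ("/", "\\/"), (".", "\\.")]

def preprocess_message_for_telegram (c : List String) : List String :=
  c.map (fun s => rpA.foldl (fun t kv => PySem.Str.replace t kv.1 kv.2) s)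

-- ===== PORT B =====
-- the set _ESC of Source B
def escKeysB : List Char := ['>', '_', '-', '<', '#', '+', '=', '/', '.']

-- Source B's while loop over one string: look at the head (and the next char for the '**' case),
-- emit into the output accumulator, advance by 2 or 1
def scanB : List Char → List Char
  | [] => []
  | [ch] => if escKeysB.contains ch then ['\\', ch] else [ch]
  | ch :: ch2 :: t =>
      if ch = '*' ∧ ch2 = '*' then '*' :: scanB t
      else (if escKeysB.contains ch then ['\\', ch] else [ch]) ++ scanB (ch2 :: t)

def preprocess_message_for_telegram_alt (c : List String) : List String :=
  c.map (fun s => String.ofList (scanB s.toList))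

-- ===== PRECONDITION & SPEC =====
def Spec_preprocess_message_for_telegram (c : List String) (out : List String) : Prop := out = preprocess_message_for_telegram_alt c
instance (c : List String) (out : List String) : Decidable (Spec_preprocess_message_for_telegram c out) := by unfold Spec_preprocess_message_for_telegram; infer_instance

-- ===== CLAIM (what is proved, stated in full; the proofs are below) =====
def Claim_equal_preprocess_message_for_telegram : Prop := ∀ (c : List String), Dom_preprocess_message_for_telegram c → Spec_preprocess_message_for_telegram c (preprocess_message_for_telegram c)

-- ===== LEMMAS AND PROOFS =====

-- proof helpers: A's staged passes, characterised one stage at a time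

-- the '**'->'*' pass, as a standalone recursion (replace's left-to-right non-overlapping rule)
def collapseStars : List Char → List Char
  | [] => []
  | [ch] => [ch]
  | ch :: ch2 :: t =>
      if ch = '*' ∧ ch2 = '*' then '*' :: collapseStars t
      else ch :: collapseStars (ch2 :: t)

-- the nine single-character escapes, as one per-character pass
def translateB (cs : List Char) : List Char :=
  cs.flatMap (fun ch => if escKeysB.contains ch then ['\\', ch] else [ch])

-- single-character replace is a per-character flatMap
theorem replace_go_single (k : Char) (v : List Char) :
    ∀ (l : List Char) (fuel : Nat) (acc : List Char), l.length ≤ fuel →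
      PySem.Chars.replace.go [k] v fuel l acc
        = acc.reverse ++ l.flatMap (fun c => if c = k then v else [c]) := by
  intro l
  induction l with
  | nil =>
      intro fuel acc _
      cases fuel <;> simp [PySem.Chars.replace.go]
  | cons c t ih =>
      intro fuel acc h
      cases fuel with
      | zero => simp at h
      | succ fuel =>
        by_cases hc : c = k
        · subst hc
          have hp : [c].isPrefixOf (c :: t) = true := by simp [List.isPrefixOf]
          simp only [PySem.Chars.replace.go, hp, if_pos, List.length_cons,
            List.length_nil, List.drop_succ_cons, List.drop_zero]
          rw [ih fuel _ (by simpa using Nat.le_of_succ_le_succ h)]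
          simp
        · have hp : [k].isPrefixOf (c :: t) = false := by
            simpa [List.isPrefixOf] using (Ne.symm hc)
          simp only [PySem.Chars.replace.go, hp]
          rw [ih fuel _ (by simpa using Nat.le_of_succ_le_succ h)]
          simp [hc]

theorem replace_single (s : List Char) (k : Char) (v : List Char) :
    PySem.Chars.replace s [k] v = s.flatMap (fun c => if c = k then v else [c]) := by
  simp [PySem.Chars.replace, replace_go_single k v s s.length [] (le_refl _)]

-- the two-character replace '**'->'*' is collapseStars
theorem replace_go_double :
    ∀ (fuel : Nat) (l : List Char) (acc : List Char), l.length ≤ fuel →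
      PySem.Chars.replace.go ['*', '*'] ['*'] fuel l acc
        = acc.reverse ++ collapseStars l := by
  intro fuel
  induction fuel with
  | zero =>
      intro l acc h
      have : l = [] := List.length_eq_zero_iff.mp (Nat.le_zero.mp h)
      subst this
      simp [PySem.Chars.replace.go, collapseStars]
  | succ fuel ih =>
      intro l acc h
      match l with
      | [] => simp [PySem.Chars.replace.go, collapseStars]
      | [c] =>
          have hp : (['*', '*'] : List Char).isPrefixOf [c] = false := by
            simp [List.isPrefixOf]
          simp only [PySem.Chars.replace.go, hp, Bool.false_eq_true, if_false]
          rw [ih [] _ (by simp)]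
          simp [collapseStars]
      | c :: c2 :: t =>
          by_cases hc : c = '*' ∧ c2 = '*'
          · obtain ⟨h1, h2⟩ := hc; subst h1; subst h2
            have hp : (['*', '*'] : List Char).isPrefixOf ('*' :: '*' :: t) = true := by
              simp [List.isPrefixOf]
            simp only [PySem.Chars.replace.go, hp, if_pos]
            rw [show (['*','*'] : List Char).length = 2 from rfl]
            simp only [List.drop_succ_cons, List.drop_zero]
            rw [ih t _ (by simp at h ⊢; omega)]
            simp [collapseStars]
          · have hp : (['*', '*'] : List Char).isPrefixOf (c :: c2 :: t) = false := by
              simp [List.isPrefixOf]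
              intro h1 h2; exact hc ⟨h1.symm, h2.symm⟩
            simp only [PySem.Chars.replace.go, hp, Bool.false_eq_true, if_false]
            rw [ih (c2 :: t) _ (by simpa using Nat.le_of_succ_le_succ h)]
            simp [collapseStars, hc]

theorem replace_double (s : List Char) :
    PySem.Chars.replace s ['*', '*'] ['*'] = collapseStars s := by
  simpa [PySem.Chars.replace] using replace_go_double s.length s [] (le_refl _)

-- a chain of single-character escapes over distinct non-backslash keys is one per-character pass
theorem chain_escape (ks : List Char) (hnd : ks.Nodup) (hb : '\\' ∉ ks) :
    ∀ s : List Char,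
      ks.foldl (fun t k => PySem.Chars.replace t [k] ['\\', k]) s
        = s.flatMap (fun c => if ks.contains c then ['\\', c] else [c]) := by
  induction ks with
  | nil => intro s; simp
  | cons k ks ih =>
      intro s
      have hk : k ∉ ks := (List.nodup_cons.mp hnd).1
      have hb' : '\\' ∉ ks := fun h => hb (List.mem_cons_of_mem _ h)
      rw [List.foldl_cons, replace_single, ih (List.nodup_cons.mp hnd).2 hb',
        List.flatMap_assoc]
      apply List.flatMap_congr
      intro c _
      by_cases hc : c = k
      · subst hc
        simp [List.contains_eq_mem, hk, hb']
      · simp [List.contains_eq_mem, hc]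

-- B's fused scan equals the collapse pass followed by the escape pass
theorem scan_eq_translate_collapse :
    ∀ l : List Char, scanB l = translateB (collapseStars l) := by
  intro l
  induction l using scanB.induct with
  | case1 => simp [scanB, collapseStars, translateB]
  | case2 ch h => simp [scanB, collapseStars, translateB]
  | case3 ch h => simp [scanB, collapseStars, translateB]
  | case4 ch ch2 t hc ih =>
      obtain ⟨h1, h2⟩ := hc; subst h1; subst h2
      have hstar : '*' ∉ escKeysB := by decide
      simp [scanB, collapseStars, translateB, hstar, ih]
  | case5 ch ch2 t hc ih =>
      simp [scanB, collapseStars, translateB, hc, ih]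

-- per-string: A's ten replaces equal B's one fused scan
theorem perString (s : String) :
    rpA.foldl (fun t kv => PySem.Str.replace t kv.1 kv.2) s
      = String.ofList (scanB s.toList) := by
  have h := chain_escape escKeysB (by decide) (by decide) (collapseStars s.toList)
  simp only [escKeysB, List.foldl_cons, List.foldl_nil] at h
  simp only [rpA, List.foldl_cons, List.foldl_nil]
  simp only [PySem.Str.replace, String.toList_ofList]
  rw [show ("**" : String).toList = ['*', '*'] from rfl, show ("*" : String).toList = ['*'] from rfl,
      replace_double,
      show (">" : String).toList = ['>'] from rfl, show ("\\>" : String).toList = ['\\', '>'] from rfl,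
      show ("_" : String).toList = ['_'] from rfl, show ("\\_" : String).toList = ['\\', '_'] from rfl,
      show ("-" : String).toList = ['-'] from rfl, show ("\\-" : String).toList = ['\\', '-'] from rfl,
      show ("<" : String).toList = ['<'] from rfl, show ("\\<" : String).toList = ['\\', '<'] from rfl,
      show ("#" : String).toList = ['#'] from rfl, show ("\\#" : String).toList = ['\\', '#'] from rfl,
      show ("+" : String).toList = ['+'] from rfl, show ("\\+" : String).toList = ['\\', '+'] from rfl,
      show ("=" : String).toList = ['='] from rfl, show ("\\=" : String).toList = ['\\', '='] from rfl,
      show ("/" : String).toList = ['/'] from rfl, show ("\\/" : String).toList = ['\\', '/'] from rfl,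
      show ("." : String).toList = ['.'] from rfl, show ("\\." : String).toList = ['\\', '.'] from rfl,
      h, scan_eq_translate_collapse, translateB]
  simp only [escKeysB]

-- ===== VERDICT (by name: the statement is the Claim_ definition above) =====
theorem preprocess_message_for_telegram_spec : Claim_equal_preprocess_message_for_telegram := by
  intro c _
  unfold Spec_preprocess_message_for_telegram preprocess_message_for_telegram preprocess_message_for_telegram_alt
  exact List.map_congr_left (fun s _ => perString s)
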